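-- pv_equiv track=rewrite | github.com/Xilinx/XRT | src/runtime_src/core/tools/xbtop/XBUtil.py | pad_string
-- ===== SOURCE A (Python) =====
-- def pad_string(padded_string, padding_width, alignment):
--     # Alignment values: 'left', 'right', 'center'
--     while True:
--         if alignment != "right":
--             if len(padded_string) < padding_width:
--                 padded_string = padded_string + " "
--         if alignment != "left":
--             if len(padded_string) < padding_width :
--                 padded_string = " " + padded_string
--         if len(padded_string) >= padding_width:
--             break;
--
--     return padded_string
-- ===== SOURCE B (Python) =====
-- def pad_string(padded_string, padding_width, alignment):
--     pad = padding_width - len(padded_string)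
--     if pad <= 0:
--         return padded_string
--     if alignment == "left":
--         return padded_string + " " * pad
--     if alignment == "right":
--         return " " * pad + padded_string
--     left = pad // 2
--     return " " * left + padded_string + " " * (pad - left)
-- ===== Notes on version B (the rewrite author's own statement) =====
-- stated objective: simpler
-- what changed: Replaced the one-space-at-a-time while-True loop by a closed-form computation of the deficit, building each pad with a single string-repeat (extra space on the right for center, as in A).
import Mathlib
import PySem

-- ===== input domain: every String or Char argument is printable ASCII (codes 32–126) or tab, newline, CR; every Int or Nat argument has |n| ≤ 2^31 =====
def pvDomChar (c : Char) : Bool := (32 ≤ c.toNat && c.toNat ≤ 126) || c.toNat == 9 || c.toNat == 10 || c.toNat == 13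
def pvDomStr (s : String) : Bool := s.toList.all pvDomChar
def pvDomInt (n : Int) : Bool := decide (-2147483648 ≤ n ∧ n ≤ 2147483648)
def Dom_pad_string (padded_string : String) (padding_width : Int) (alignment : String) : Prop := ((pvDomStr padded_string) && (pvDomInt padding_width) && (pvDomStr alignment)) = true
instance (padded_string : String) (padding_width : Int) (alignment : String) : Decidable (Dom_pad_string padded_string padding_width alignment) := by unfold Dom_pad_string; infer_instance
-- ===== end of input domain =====

-- B replaces A's one-space-at-a-time while-loop by a closed-form deficit computation (simpler).

-- ===== PORT A =====
-- The `while True` loop of A, with a fuel argument that only makes the recursion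
-- structurally total: the initial fuel (deficit + 1) is always enough, so the
-- fuel-0 branch is never reached on any input.
def padLoopA : Nat → List Char → Int → String → List Char
  | 0, s, _, _ => s
  | fuel+1, s, w, al =>
    let s1 := if al ≠ "right" ∧ (s.length : Int) < w then s ++ [' '] else s
    let s2 := if al ≠ "left" ∧ (s1.length : Int) < w then ' ' :: s1 else s1
    if (s2.length : Int) ≥ w then s2 else padLoopA fuel s2 w al

def pad_string (padded_string : String) (padding_width : Int) (alignment : String) : String :=
  String.ofList (padLoopA ((padding_width - (padded_string.toList.length : Int)).toNat + 1)
    padded_string.toList padding_width alignment)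

-- ===== PORT B =====
def pad_string_alt (padded_string : String) (padding_width : Int) (alignment : String) : String :=
  let pad := padding_width - (padded_string.toList.length : Int)
  if pad ≤ 0 then padded_string
  else if alignment = "left" then String.ofList (padded_string.toList ++ List.replicate pad.toNat ' ')
  else if alignment = "right" then String.ofList (List.replicate pad.toNat ' ' ++ padded_string.toList)
  else
    let l := pad.toNat / 2
    String.ofList (List.replicate l ' ' ++ padded_string.toList ++ List.replicate (pad.toNat - l) ' ')

-- ===== PRECONDITION & SPEC =====
def Spec_pad_string (padded_string : String) (padding_width : Int) (alignment : String) (out : String) : Prop := out = pad_string_alt padded_string padding_width alignment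
instance (padded_string : String) (padding_width : Int) (alignment : String) (out : String) : Decidable (Spec_pad_string padded_string padding_width alignment out) := by unfold Spec_pad_string; infer_instance

-- ===== CLAIM (what is proved, stated in full; the proofs are below) =====
def Claim_equal_pad_string : Prop := ∀ (padded_string : String) (padding_width : Int) (alignment : String), Dom_pad_string padded_string padding_width alignment → Spec_pad_string padded_string padding_width alignment (pad_string padded_string padding_width alignment)

-- ===== LEMMAS AND PROOFS =====

theorem padLoopA_right (w : Int) : ∀ (f : Nat) (s : List Char),
    w - (s.length : Int) < (f : Int) →
    padLoopA f s w "right" = List.replicate (w - (s.length : Int)).toNat ' ' ++ s := by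
  intro f
  induction f with
  | zero =>
    intro s h
    simp only [Nat.cast_zero] at h
    have h0 : (w - (s.length : Int)).toNat = 0 := by omega
    simp [padLoopA, h0]
  | succ n ih =>
    intro s h
    simp only [padLoopA]
    rw [if_neg (show ¬(("right" : String) ≠ "right" ∧ (s.length : Int) < w) by simp)]
    by_cases hlt : (s.length : Int) < w
    · rw [if_pos (show ("right" : String) ≠ "left" ∧ (s.length : Int) < w from ⟨by decide, hlt⟩)]
      by_cases hbr : ((' ' :: s).length : Int) ≥ w
      · rw [if_pos hbr]
        have h1 : (w - (s.length : Int)).toNat = 1 := by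
          simp only [List.length_cons] at hbr; push_cast at hbr; omega
        rw [h1]
        simp
      · rw [if_neg hbr]
        rw [ih (' ' :: s) (by simp only [List.length_cons]; push_cast at h ⊢; omega)]
        have h1 : (w - ((' ' :: s).length : Int)).toNat + 1 = (w - (s.length : Int)).toNat := by
          simp only [List.length_cons] at hbr ⊢; push_cast at hbr ⊢; omega
        rw [← h1, List.replicate_succ']
        simp
    · rw [if_neg (show ¬(("right" : String) ≠ "left" ∧ (s.length : Int) < w) from fun hc => hlt hc.2)]
      rw [if_pos (show (s.length : Int) ≥ w by omega)]
      have h0 : (w - (s.length : Int)).toNat = 0 := by omega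
      simp [h0]

theorem padLoopA_left (w : Int) : ∀ (f : Nat) (s : List Char),
    w - (s.length : Int) < (f : Int) →
    padLoopA f s w "left" = s ++ List.replicate (w - (s.length : Int)).toNat ' ' := by
  intro f
  induction f with
  | zero =>
    intro s h
    simp only [Nat.cast_zero] at h
    have h0 : (w - (s.length : Int)).toNat = 0 := by omega
    simp [padLoopA, h0]
  | succ n ih =>
    intro s h
    simp only [padLoopA]
    by_cases hlt : (s.length : Int) < w
    · rw [if_pos (show ("left" : String) ≠ "right" ∧ (s.length : Int) < w from ⟨by decide, hlt⟩)]
      rw [if_neg (show ¬(("left" : String) ≠ "left" ∧ ((s ++ [' ']).length : Int) < w) by simp)]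
      by_cases hbr : ((s ++ [' ']).length : Int) ≥ w
      · rw [if_pos hbr]
        have h1 : (w - (s.length : Int)).toNat = 1 := by
          simp only [List.length_append, List.length_cons, List.length_nil] at hbr
          push_cast at hbr; omega
        rw [h1]
        simp
      · rw [if_neg hbr]
        rw [ih (s ++ [' ']) (by simp only [List.length_append, List.length_cons, List.length_nil]; push_cast at h ⊢; omega)]
        have h1 : (w - ((s ++ [' ']).length : Int)).toNat + 1 = (w - (s.length : Int)).toNat := by
          simp only [List.length_append, List.length_cons, List.length_nil] at hbr ⊢
          push_cast at hbr ⊢; omega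
        rw [← h1, List.append_assoc]
        simp [List.replicate_succ]
    · rw [if_neg (show ¬(("left" : String) ≠ "right" ∧ (s.length : Int) < w) from fun hc => hlt hc.2)]
      rw [if_neg (show ¬(("left" : String) ≠ "left" ∧ (s.length : Int) < w) by simp)]
      rw [if_pos (show (s.length : Int) ≥ w by omega)]
      have h0 : (w - (s.length : Int)).toNat = 0 := by omega
      simp [h0]

theorem padLoopA_center (w : Int) (al : String) (hL : al ≠ "left") (hR : al ≠ "right") :
    ∀ (f : Nat) (s : List Char),
    w - (s.length : Int) < (f : Int) →
    padLoopA f s w al =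
      List.replicate ((w - (s.length : Int)).toNat / 2) ' ' ++ s ++
      List.replicate ((w - (s.length : Int)).toNat - (w - (s.length : Int)).toNat / 2) ' ' := by
  intro f
  induction f with
  | zero =>
    intro s h
    simp only [Nat.cast_zero] at h
    have h0 : (w - (s.length : Int)).toNat = 0 := by omega
    simp [padLoopA, h0]
  | succ n ih =>
    intro s h
    simp only [padLoopA]
    by_cases hlt : (s.length : Int) < w
    · rw [if_pos (And.intro hR hlt)]
      by_cases hlt2 : ((s ++ [' ']).length : Int) < w
      · rw [if_pos (And.intro hL hlt2)]
        by_cases hbr : ((' ' :: (s ++ [' '])).length : Int) ≥ w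
        · rw [if_pos hbr]
          have hd : (w - (s.length : Int)).toNat = 2 := by
            simp only [List.length_cons, List.length_append, List.length_nil] at hbr hlt2
            push_cast at hbr hlt2; omega
          rw [hd]
          simp [List.replicate_succ]
        · rw [if_neg hbr]
          rw [ih (' ' :: (s ++ [' '])) (by
            simp only [List.length_cons, List.length_append, List.length_nil]
            push_cast at h ⊢; omega)]
          have hlen : ((' ' :: (s ++ [' '])).length : Int) = (s.length : Int) + 2 := by
            simp only [List.length_cons, List.length_append, List.length_nil]
            push_cast; ring
          rw [hlen]
          set d := (w - (s.length : Int)).toNat with hdd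
          have hdge : 3 ≤ d := by
            simp only [List.length_cons, List.length_append, List.length_nil] at hbr
            push_cast at hbr; omega
          have hsub : (w - ((s.length : Int) + 2)).toNat = d - 2 := by omega
          rw [hsub]
          have e1 : (d - 2) / 2 + 1 = d / 2 := by omega
          have e2 : ((d - 2) - (d - 2) / 2) + 1 = d - d / 2 := by omega
          rw [← e2, ← e1, List.replicate_succ', List.replicate_succ]
          simp [List.append_assoc]
      · rw [if_neg (show ¬(al ≠ "left" ∧ ((s ++ [' ']).length : Int) < w) from fun hc => hlt2 hc.2)]
        have hbr : ((s ++ [' ']).length : Int) ≥ w := by omega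
        rw [if_pos hbr]
        have hd : (w - (s.length : Int)).toNat = 1 := by
          simp only [List.length_append, List.length_cons, List.length_nil] at hlt2
          push_cast at hlt2; omega
        rw [hd]
        simp
    · rw [if_neg (show ¬(al ≠ "right" ∧ (s.length : Int) < w) from fun hc => hlt hc.2)]
      rw [if_neg (show ¬(al ≠ "left" ∧ (s.length : Int) < w) from fun hc => hlt hc.2)]
      rw [if_pos (show (s.length : Int) ≥ w by omega)]
      have h0 : (w - (s.length : Int)).toNat = 0 := by omega
      simp [h0]

-- ===== VERDICT (by name: the statement is the Claim_ definition above) =====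
theorem pad_string_spec : Claim_equal_pad_string := by
  intro s w al _
  unfold Spec_pad_string pad_string pad_string_alt
  set d := w - (s.toList.length : Int) with hd
  have hf : w - (s.toList.length : Int) < ((d.toNat + 1 : Nat) : Int) := by push_cast; omega
  by_cases h0 : d ≤ 0
  · have ht : d.toNat = 0 := by omega
    rw [if_pos h0]
    by_cases hal : al = "left"
    · rw [hal, padLoopA_left w _ _ hf, ← hd, ht]
      simp [String.ofList_toList]
    · by_cases har : al = "right"
      · rw [har, padLoopA_right w _ _ hf, ← hd, ht]
        simp [String.ofList_toList]
      · rw [padLoopA_center w al hal har _ _ hf, ← hd, ht]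
        simp [String.ofList_toList]
  · rw [if_neg h0]
    by_cases hal : al = "left"
    · rw [hal, padLoopA_left w _ _ hf, if_pos rfl]
    · rw [if_neg hal]
      by_cases har : al = "right"
      · rw [har, padLoopA_right w _ _ hf, if_pos rfl]
      · rw [if_neg har, padLoopA_center w al hal har _ _ hf]
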